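-- pv_equiv track=rewrite | github.com/earthly/website | util/psupport/psupport/scripts/set_category.py | remove_existing_categories
-- ===== SOURCE A (Python) =====
-- def remove_existing_categories(lines):
--     """Remove existing categories from the front matter."""
--     in_front_matter = False
--     new_lines = []
--     skip_lines = False
--
--     for line in lines:
--         if line.strip() == "---":
--             if in_front_matter:
--                 in_front_matter = False
--             else:
--                 in_front_matter = True
--             new_lines.append(line)
--             continue
--
--         if in_front_matter and line.strip().startswith("categories:"):
--             skip_lines = True
--             continue
--
--         if skip_lines and line.strip().startswith("-"):
--             continue
--         else:
--             skip_lines = False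
--
--         new_lines.append(line)
--
--     return new_lines
-- ===== SOURCE B (Python) =====
-- def remove_existing_categories(lines):
--     """Remove existing categories from the front matter."""
--     result = []
--     in_front_matter = False
--     i = 0
--     while i < len(lines):
--         line = lines[i]
--         stripped = line.strip()
--         if stripped == "---":
--             in_front_matter = not in_front_matter
--         elif in_front_matter and stripped.startswith("categories:"):
--             # consume the whole categories block: the entry lines under it
--             i += 1
--             while i < len(lines):
--                 s = lines[i].strip()
--                 if s == "---" or not s.startswith("-"):
--                     break
--                 i += 1
--             continue
--         result.append(line)
--         i += 1
--     return result
-- ===== Notes on version B (the rewrite author's own statement) =====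
-- stated objective: alternative
-- what changed: Replaced A's single-pass state machine with a persistent skip_lines flag by an index-driven outer loop whose inner loop consumes one whole categories block (entries starting with '-' up to the next '---' delimiter), so no skip flag outlives the block.
-- intended difference: On inputs where a front-matter categories block runs into a '---' delimiter that is followed (possibly after further '---' lines) by a line starting with '-', A's surviving skip flag keeps deleting those '-' lines beyond the delimiter, while B ends the block at the delimiter and keeps them; B's value is intended because a categories block cannot extend past the front-matter terminator. — e.g. on remove_existing_categories(["---", "categories:", "- a", "---", "- b"]): A returns ["---", "---"], B returns ["---", "---", "- b"]
import Mathlib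
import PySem

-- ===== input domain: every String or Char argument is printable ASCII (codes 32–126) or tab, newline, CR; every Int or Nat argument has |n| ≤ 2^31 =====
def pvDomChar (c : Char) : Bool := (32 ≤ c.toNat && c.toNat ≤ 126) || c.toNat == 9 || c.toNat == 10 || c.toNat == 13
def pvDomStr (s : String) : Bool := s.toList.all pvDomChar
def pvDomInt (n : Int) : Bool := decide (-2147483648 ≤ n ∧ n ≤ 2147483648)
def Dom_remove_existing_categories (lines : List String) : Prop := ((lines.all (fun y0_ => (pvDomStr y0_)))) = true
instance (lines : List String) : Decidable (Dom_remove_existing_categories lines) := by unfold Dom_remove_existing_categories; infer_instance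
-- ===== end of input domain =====

-- B replaces A's state machine (with its persistent skip_lines flag) by an index walk whose inner
-- loop consumes one whole categories block; outside D_ the return values agree (objective: alternative).

-- ===== PORT A =====
-- loop body of A's for-loop; state = (in_front_matter, new_lines, skip_lines)
def stepA (st : Bool × List String × Bool) (line : String) : Bool × List String × Bool :=
  let ifm := st.1
  let nl := st.2.1
  let skip := st.2.2
  if PySem.Str.strip line = "---" then
    (!ifm, nl ++ [line], skip)
  else if ifm && PySem.Str.startswith (PySem.Str.strip line) "categories:" then
    (ifm, nl, true)
  else if skip && PySem.Str.startswith (PySem.Str.strip line) "-" then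
    (ifm, nl, skip)
  else
    (ifm, nl ++ [line], false)

def remove_existing_categories (lines : List String) : List String :=
  (lines.foldl stepA (false, [], false)).2.1

-- ===== PORT B =====
-- Source B's outer while loop (bOuter) and the inner block-consuming loop (bInner), as structural
-- recursion on the remaining lines; the inner loop's break/continue re-hands the line to the outer loop
mutual
def bOuter (ifm : Bool) : List String → List String
  | [] => []
  | line :: rest =>
    let stripped := PySem.Str.strip line
    if stripped = "---" then line :: bOuter (!ifm) rest
    else if ifm && PySem.Str.startswith stripped "categories:" then bInner ifm rest
    else line :: bOuter ifm rest
termination_by l => 2 * l.length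
def bInner (ifm : Bool) : List String → List String
  | [] => []
  | line :: rest =>
    let s := PySem.Str.strip line
    if s = "---" || !(PySem.Str.startswith s "-") then bOuter ifm (line :: rest)
    else bInner ifm rest
termination_by l => 2 * l.length + 1
end

def remove_existing_categories_alt (lines : List String) : List String :=
  bOuter false lines

-- ===== PRECONDITION & SPEC =====
-- line classifiers used by D_ (they only inspect the input)
def isSepL (l : String) : Bool := PySem.Str.strip l == "---"
def isCatL (l : String) : Bool := PySem.Str.startswith (PySem.Str.strip l) "categories:"
-- an entry line of a categories block: starts with '-' but is not the '---' delimiter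
def isEntryL (l : String) : Bool := PySem.Str.startswith (PySem.Str.strip l) "-" && !isSepL l

-- On inputs where a front-matter categories block runs into a '---' delimiter that is followed
-- (possibly after further '---' lines) by a line starting with '-', A's surviving skip flag keeps
-- deleting those '-' lines beyond the delimiter, while B ends the block at the delimiter and keeps
-- them; B's value is intended since a categories block cannot extend past the front-matter terminator.
def D_remove_existing_categories (lines : List String) : Prop :=
  ∃ t ∈ lines.tails, t.head?.any isCatL ∧ Odd (lines.countP isSepL + t.countP isSepL) ∧
    ((t.tail.dropWhile isEntryL).dropWhile isSepL).head?.any isEntryL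
instance (lines : List String) : Decidable (D_remove_existing_categories lines) := by
  unfold D_remove_existing_categories; infer_instance

def Spec_remove_existing_categories (lines : List String) (out : List String) : Prop :=
  ¬ D_remove_existing_categories lines → out = remove_existing_categories_alt lines
instance (lines : List String) (out : List String) : Decidable (Spec_remove_existing_categories lines out) := by
  unfold Spec_remove_existing_categories; infer_instance

def pvDiffWitness_remove_existing_categories : List String :=
  ["---", "categories:", "- a", "---", "- b"]
def pvDiffWitnessOut_remove_existing_categories : (List String) × (List String) :=
  (["---", "---"], ["---", "---", "- b"])

-- ===== CLAIM (what is proved, stated in full; the proofs are below) =====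
def Claim_unchanged_remove_existing_categories : Prop :=
  ∀ (lines : List String), Dom_remove_existing_categories lines →
    Spec_remove_existing_categories lines (remove_existing_categories lines)
def Claim_changed_remove_existing_categories : Prop :=
  Dom_remove_existing_categories (pvDiffWitness_remove_existing_categories) ∧
  D_remove_existing_categories (pvDiffWitness_remove_existing_categories) ∧
  remove_existing_categories (pvDiffWitness_remove_existing_categories) = pvDiffWitnessOut_remove_existing_categories.1 ∧
  remove_existing_categories_alt (pvDiffWitness_remove_existing_categories) = pvDiffWitnessOut_remove_existing_categories.2 ∧
  pvDiffWitnessOut_remove_existing_categories.1 ≠ pvDiffWitnessOut_remove_existing_categories.2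

def Claim_exact_remove_existing_categories : Prop :=
  ∀ (lines : List String), Dom_remove_existing_categories lines →
    D_remove_existing_categories lines →
    remove_existing_categories lines ≠ remove_existing_categories_alt lines

-- ===== LEMMAS AND PROOFS =====

-- the dash classifier (isEntryL without the delimiter exclusion) and classifier facts
def isDashL (l : String) : Bool := PySem.Str.startswith (PySem.Str.strip l) "-"

theorem isEntryL_eq (l : String) : isEntryL l = (isDashL l && !isSepL l) := rfl

theorem cat_head (l : String) (h : isCatL l = true) :
    ∃ t, PySem.Chars.strip l.toList = 'c' :: t := by
  simp [isCatL] at h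
  obtain ⟨u, hu⟩ := (PySem.Chars.startswith_iff _ _).1 h
  exact ⟨"ategories:".toList ++ u, by simpa using hu.symm⟩

theorem cat_not_sep (l : String) (h : isCatL l = true) : isSepL l = false := by
  obtain ⟨t, ht⟩ := cat_head l h
  simp [isSepL]
  intro he
  have h2 := congrArg String.toList he
  simp [ht] at h2

theorem cat_not_dash (l : String) (h : isCatL l = true) : isDashL l = false := by
  obtain ⟨t, ht⟩ := cat_head l h
  simp only [isDashL, PySem.Str.startswith_eq, PySem.Str.toList_strip, ht]
  rw [Bool.eq_false_iff]
  intro hd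
  obtain ⟨u, hu⟩ := (PySem.Chars.startswith_iff _ _).1 hd
  simp at hu

-- proof-side restatements of D_'s tail condition, per joint state
def tailC (xs : List String) : Bool :=
  ((xs.dropWhile isEntryL).dropWhile isSepL).head?.any isEntryL
def tail3 (xs : List String) : Bool :=
  (xs.dropWhile isSepL).head?.any isEntryL
def TrigP (ifm : Bool) (rest : List String) : Prop :=
  ∃ i, i < rest.length ∧ isCatL (rest.getD i "") = true ∧
    (rest.take i).countP (fun l => isSepL l) % 2 = (if ifm then 0 else 1) ∧
    tailC (rest.drop (i+1)) = true

theorem trigP_cons (l : String) (r : List String) (ifm : Bool) (hsep : isSepL l = false)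
    (h : TrigP ifm r) : TrigP ifm (l :: r) := by
  obtain ⟨i, hi, hcat, hpar, ht⟩ := h
  exact ⟨i+1, by simp; omega, by simpa using hcat,
    by simpa [List.countP_cons, hsep] using hpar, by simpa using ht⟩

theorem trigP_cons_sep (l : String) (r : List String) (ifm : Bool) (hsep : isSepL l = true)
    (h : TrigP (!ifm) r) : TrigP ifm (l :: r) := by
  obtain ⟨i, hi, hcat, hpar, ht⟩ := h
  refine ⟨i+1, by simp; omega, by simpa using hcat, ?_, by simpa using ht⟩
  have : (l :: r.take i).countP (fun l => isSepL l)
      = (r.take i).countP (fun l => isSepL l) + 1 := by simp [hsep]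
  simp only [List.take_succ_cons, this]
  cases ifm <;> simp_all <;> omega

theorem tailC_to_trigP (l : String) (r : List String) (hcat : isCatL l = true)
    (h : tailC r = true) : TrigP true (l :: r) := by
  exact ⟨0, by simp, by simpa using hcat, by simp, by simpa using h⟩

-- product automaton of the two programs: badN = true says the pair, started in joint state N on the
-- remaining lines, will reach the one transition where the outputs diverge
-- state 1: A has skip_lines = False, B is in the outer loop
-- state 2: A has skip_lines = True,  B is in the inner loop
-- state 3: A has skip_lines = True,  B is in the outer loop (entered at a '---' inside a block)
mutual
def bad1 (ifm : Bool) : List String → Bool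
  | [] => false
  | l :: r =>
    if isSepL l then bad1 (!ifm) r
    else if ifm && isCatL l then bad2 ifm r
    else bad1 ifm r
def bad2 (ifm : Bool) : List String → Bool
  | [] => false
  | l :: r =>
    if isSepL l then bad3 (!ifm) r
    else if ifm && isCatL l then bad2 ifm r
    else if isDashL l then bad2 ifm r
    else bad1 ifm r
def bad3 (ifm : Bool) : List String → Bool
  | [] => false
  | l :: r =>
    if isSepL l then bad3 (!ifm) r
    else if ifm && isCatL l then bad2 ifm r
    else if isDashL l then true
    else bad1 ifm r
end

theorem bads_to_pat (rest : List String) : ∀ (ifm : Bool),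
    (bad1 ifm rest = true → TrigP ifm rest) ∧
    (bad2 ifm rest = true → TrigP ifm rest ∨ tailC rest = true) ∧
    (bad3 ifm rest = true → TrigP ifm rest ∨ tail3 rest = true) := by
  induction rest with
  | nil => intro ifm; refine ⟨?_, ?_, ?_⟩ <;> intro h <;> simp [bad1, bad2, bad3] at h
  | cons l r ih =>
    intro ifm
    refine ⟨?_, ?_, ?_⟩ <;> intro h
    · rw [bad1] at h
      split_ifs at h with hs hc
      · exact trigP_cons_sep l r ifm hs ((ih (!ifm)).1 h)
      · rw [Bool.and_eq_true] at hc
        rcases (ih ifm).2.1 h with ht | htc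
        · exact trigP_cons l r ifm (cat_not_sep l hc.2) ht
        · rw [hc.1]; exact tailC_to_trigP l r hc.2 htc
      · exact trigP_cons l r ifm (by simpa using hs) ((ih ifm).1 h)
    · rw [bad2] at h
      split_ifs at h with hs hc hd
      · rcases (ih (!ifm)).2.2 h with ht | ht3
        · exact Or.inl (trigP_cons_sep l r ifm hs ht)
        · refine Or.inr ?_
          have hnd : isEntryL l = false := by simp [isEntryL_eq, hs]
          simpa [tailC, tail3, hnd, hs] using ht3
      · rw [Bool.and_eq_true] at hc
        rcases (ih ifm).2.1 h with ht | htc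
        · exact Or.inl (trigP_cons l r ifm (cat_not_sep l hc.2) ht)
        · rw [hc.1]; exact Or.inl (tailC_to_trigP l r hc.2 htc)
      · rcases (ih ifm).2.1 h with ht | htc
        · exact Or.inl (trigP_cons l r ifm (by simpa using hs) ht)
        · refine Or.inr ?_
          have hpd : isEntryL l = true := by
            simp [isEntryL_eq, hd, (by simpa using hs : isSepL l = false)]
          simpa [tailC, hpd] using htc
      · exact Or.inl (trigP_cons l r ifm (by simpa using hs) ((ih ifm).1 h))
    · rw [bad3] at h
      split_ifs at h with hs hc hd
      · rcases (ih (!ifm)).2.2 h with ht | ht3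
        · exact Or.inl (trigP_cons_sep l r ifm hs ht)
        · refine Or.inr ?_
          simpa [tail3, hs] using ht3
      · rw [Bool.and_eq_true] at hc
        rcases (ih ifm).2.1 h with ht | htc
        · exact Or.inl (trigP_cons l r ifm (cat_not_sep l hc.2) ht)
        · rw [hc.1]; exact Or.inl (tailC_to_trigP l r hc.2 htc)
      · refine Or.inr ?_
        have hns : isSepL l = false := by simpa using hs
        simp [tail3, isEntryL_eq, hns, hd]
      · exact Or.inl (trigP_cons l r ifm (by simpa using hs) ((ih ifm).1 h))

theorem trigP_D (lines : List String) (h : TrigP false lines) :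
    D_remove_existing_categories lines := by
  obtain ⟨i, hi, hcat, hpar, ht⟩ := h
  refine ⟨lines.drop i, ((List.mem_tails _ _).2 (List.drop_suffix i lines)), ?_, ?_, ?_⟩
  · have h1 : (lines.drop i).head? = some lines[i] := by
      simp [List.head?_drop, hi]
    simp only [h1, Option.any_some]
    simpa [List.getD_eq_getElem, hi] using hcat
  · have hsplit : lines.countP isSepL
        = (lines.take i).countP isSepL + (lines.drop i).countP isSepL := by
      conv_lhs => rw [← List.take_append_drop i lines]
      rw [List.countP_append]
    rw [hsplit, Nat.odd_iff]
    have hp : (lines.take i).countP isSepL % 2 = 1 := by simpa using hpar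
    omega
  · simpa [tailC, List.tail_drop] using ht

theorem key (rest : List String) : ∀ (ifm : Bool) (nl : List String),
    (bad1 ifm rest = false → (rest.foldl stepA (ifm, nl, false)).2.1 = nl ++ bOuter ifm rest) ∧
    (bad2 ifm rest = false → (rest.foldl stepA (ifm, nl, true)).2.1 = nl ++ bInner ifm rest) ∧
    (bad3 ifm rest = false → (rest.foldl stepA (ifm, nl, true)).2.1 = nl ++ bOuter ifm rest) := by
  induction rest with
  | nil => intro ifm nl; refine ⟨?_, ?_, ?_⟩ <;> intro _ <;> simp [bOuter, bInner]
  | cons l r ih =>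
    intro ifm nl
    by_cases hs : isSepL l = true
    · -- '---' line: appended by both, toggles; A keeps its skip flag, B is in / returns to the outer loop
      have hs' : PySem.Str.strip l = "---" := by simpa [isSepL] using hs
      have hstep : ∀ sk, stepA (ifm, nl, sk) l = (!ifm, nl ++ [l], sk) := by
        intro sk; simp [stepA, hs']
      have hB : bOuter ifm (l :: r) = l :: bOuter (!ifm) r := by
        rw [bOuter]; simp [hs']
      have hBi : bInner ifm (l :: r) = bOuter ifm (l :: r) := by
        rw [bInner]; simp [hs']
      refine ⟨?_, ?_, ?_⟩ <;> intro h
      · rw [bad1, if_pos hs] at h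
        rw [List.foldl_cons, hstep, (ih (!ifm) (nl ++ [l])).1 h, hB]; simp
      · rw [bad2, if_pos hs] at h
        rw [List.foldl_cons, hstep, (ih (!ifm) (nl ++ [l])).2.2 h, hBi, hB]; simp
      · rw [bad3, if_pos hs] at h
        rw [List.foldl_cons, hstep, (ih (!ifm) (nl ++ [l])).2.2 h, hB]; simp
    · have hs' : ¬ PySem.Str.strip l = "---" := by simpa [isSepL] using hs
      by_cases hc : (ifm && isCatL l) = true
      · -- categories trigger: both skip the line and (re-)enter block mode
        rw [Bool.and_eq_true] at hc
        have hc2 : PySem.Chars.startswith (PySem.Chars.strip l.toList)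
            ['c','a','t','e','g','o','r','i','e','s',':'] = true := by
          simpa [isCatL] using hc.2
        have hnd2 : PySem.Chars.startswith (PySem.Chars.strip l.toList) ['-'] = false := by
          simpa [isDashL] using cat_not_dash l hc.2
        have hstep : ∀ sk, stepA (ifm, nl, sk) l = (ifm, nl, true) := by
          intro sk; simp [stepA, hs', hc.1, hc2]
        have hB : bOuter ifm (l :: r) = bInner ifm r := by
          rw [bOuter]; simp [hs', hc.1, hc2]
        have hBi : bInner ifm (l :: r) = bOuter ifm (l :: r) := by
          rw [bInner]; simp [hs', hnd2]
        have hpos : (ifm && isCatL l) = true := by simp [hc.1, hc.2]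
        refine ⟨?_, ?_, ?_⟩ <;> intro h
        · rw [bad1, if_neg (by simpa using hs), if_pos hpos] at h
          rw [List.foldl_cons, hstep, (ih ifm nl).2.1 h, hB]
        · rw [bad2, if_neg (by simpa using hs), if_pos hpos] at h
          rw [List.foldl_cons, hstep, (ih ifm nl).2.1 h, hBi, hB]
        · rw [bad3, if_neg (by simpa using hs), if_pos hpos] at h
          rw [List.foldl_cons, hstep, (ih ifm nl).2.1 h, hB]
      · have hcand : (ifm && PySem.Chars.startswith (PySem.Chars.strip l.toList)
            ['c','a','t','e','g','o','r','i','e','s',':']) = false := by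
          simpa [isCatL] using (show (ifm && isCatL l) = false by simpa using hc)
        by_cases hd : isDashL l = true
        · -- plain '-' line (not '---'): A skips it iff its skip flag is set, B iff it is in the inner loop
          have hd2 : PySem.Chars.startswith (PySem.Chars.strip l.toList) ['-'] = true := by
            simpa [isDashL] using hd
          have hB : bOuter ifm (l :: r) = l :: bOuter ifm r := by
            rw [bOuter]; simp [hs', hcand]
          have hBi : bInner ifm (l :: r) = bInner ifm r := by
            rw [bInner]; simp [hs', hd2]
          refine ⟨?_, ?_, ?_⟩ <;> intro h
          · rw [bad1, if_neg (by simpa using hs), if_neg (by simpa using hc)] at h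
            have hstep : stepA (ifm, nl, false) l = (ifm, nl ++ [l], false) := by
              simp [stepA, hs', hcand]
            rw [List.foldl_cons, hstep, (ih ifm (nl ++ [l])).1 h, hB]; simp
          · rw [bad2, if_neg (by simpa using hs), if_neg (by simpa using hc), if_pos hd] at h
            have hstep : stepA (ifm, nl, true) l = (ifm, nl, true) := by
              simp [stepA, hs', hcand, hd2]
            rw [List.foldl_cons, hstep, (ih ifm nl).2.1 h, hBi]
          · -- the diverging transition: ruled out by bad3 = false
            rw [bad3, if_neg (by simpa using hs), if_neg (by simpa using hc), if_pos hd] at h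
            exact absurd h (by simp)
        · -- ordinary line: both append it; A clears its skip flag, B('s inner loop) returns to the outer loop
          have hd2 : PySem.Chars.startswith (PySem.Chars.strip l.toList) ['-'] = false := by
            simpa [isDashL] using hd
          have hstep : ∀ sk, stepA (ifm, nl, sk) l = (ifm, nl ++ [l], false) := by
            intro sk; simp [stepA, hs', hcand, hd2]
          have hB : bOuter ifm (l :: r) = l :: bOuter ifm r := by
            rw [bOuter]; simp [hs', hcand]
          have hBi : bInner ifm (l :: r) = bOuter ifm (l :: r) := by
            rw [bInner]; simp [hs', hd2]
          refine ⟨?_, ?_, ?_⟩ <;> intro h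
          · rw [bad1, if_neg (by simpa using hs), if_neg (by simpa using hc)] at h
            rw [List.foldl_cons, hstep, (ih ifm (nl ++ [l])).1 h, hB]; simp
          · rw [bad2, if_neg (by simpa using hs), if_neg (by simpa using hc), if_neg (by simpa using hd)] at h
            rw [List.foldl_cons, hstep, (ih ifm (nl ++ [l])).1 h, hBi, hB]; simp
          · rw [bad3, if_neg (by simpa using hs), if_neg (by simpa using hc), if_neg (by simpa using hd)] at h
            rw [List.foldl_cons, hstep, (ih ifm (nl ++ [l])).1 h, hB]; simp

-- ===== tightness: inside D_ the two outputs always differ (A's is strictly shorter) =====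

theorem sep_bnot (ifm : Bool) :
    ∀ n : Nat, (n + 1) % 2 = (if ifm then 0 else 1) → n % 2 = (if !ifm then 0 else 1) := by
  cases ifm <;> intro n h <;> simp at * <;> omega

theorem trigP_down (l : String) (r : List String) (ifm : Bool) (h : TrigP ifm (l :: r)) :
    (isCatL l = true ∧ ifm = true ∧ tailC r = true) ∨
      TrigP (if isSepL l then !ifm else ifm) r := by
  obtain ⟨i, hi, hcat, hpar, ht⟩ := h
  cases i with
  | zero =>
    left
    have hifm : ifm = true := by cases hf : ifm <;> simp [hf] at hpar ⊢
    exact ⟨by simpa using hcat, hifm, by simpa using ht⟩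
  | succ i' =>
    right
    refine ⟨i', by simp at hi; omega, by simpa using hcat, ?_, by simpa using ht⟩
    cases hls : isSepL l with
    | true =>
      have := by simpa [List.countP_cons, hls] using hpar
      simpa [hls] using sep_bnot ifm _ this
    | false =>
      simpa [List.countP_cons, hls] using hpar

theorem pat_to_bads (rest : List String) : ∀ (ifm : Bool),
    (TrigP ifm rest → bad1 ifm rest = true) ∧
    ((TrigP ifm rest ∨ tailC rest = true) → bad2 ifm rest = true) ∧
    ((TrigP ifm rest ∨ tail3 rest = true) → bad3 ifm rest = true) := by
  induction rest with
  | nil =>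
    intro ifm
    refine ⟨?_, ?_, ?_⟩
    · rintro ⟨i, hi, -⟩; simp at hi
    · rintro (⟨i, hi, -⟩ | h) <;> simp [tailC] at *
    · rintro (⟨i, hi, -⟩ | h) <;> simp [tail3] at *
  | cons l r ih =>
    intro ifm
    by_cases hs : isSepL l = true
    · have hne : isEntryL l = false := by simp [isEntryL, hs]
      refine ⟨?_, ?_, ?_⟩
      · intro h
        rcases trigP_down l r ifm h with ⟨hc, -, -⟩ | ht
        · exact absurd hs (by simp [cat_not_sep l hc])
        · rw [bad1, if_pos hs]; exact (ih (!ifm)).1 (by simpa [hs] using ht)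
      · intro h
        rw [bad2, if_pos hs]
        refine (ih (!ifm)).2.2 ?_
        rcases h with ht | htc
        · rcases trigP_down l r ifm ht with ⟨hc, -, -⟩ | ht'
          · exact absurd hs (by simp [cat_not_sep l hc])
          · exact Or.inl (by simpa [hs] using ht')
        · exact Or.inr (by simpa [tailC, tail3, hne, hs] using htc)
      · intro h
        rw [bad3, if_pos hs]
        refine (ih (!ifm)).2.2 ?_
        rcases h with ht | ht3
        · rcases trigP_down l r ifm ht with ⟨hc, -, -⟩ | ht'
          · exact absurd hs (by simp [cat_not_sep l hc])
          · exact Or.inl (by simpa [hs] using ht')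
        · exact Or.inr (by simpa [tail3, hs] using ht3)
    · have hs' : isSepL l = false := by simpa using hs
      by_cases hc : (ifm && isCatL l) = true
      · rw [Bool.and_eq_true] at hc
        have hpos : (ifm && isCatL l) = true := by simp [hc.1, hc.2]
        have down : TrigP ifm (l :: r) → TrigP ifm r ∨ tailC r = true := by
          intro ht
          rcases trigP_down l r ifm ht with ⟨-, -, htc⟩ | ht'
          · exact Or.inr htc
          · exact Or.inl (by simpa [hs'] using ht')
        have hnd : isEntryL l = false := by
          simp [isEntryL_eq, cat_not_dash l hc.2]
        refine ⟨?_, ?_, ?_⟩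
        · intro h
          rw [bad1, if_neg (by simp [hs']), if_pos hpos]
          exact (ih ifm).2.1 (down h)
        · intro h
          rw [bad2, if_neg (by simp [hs']), if_pos hpos]
          refine (ih ifm).2.1 ?_
          rcases h with ht | htc
          · exact down ht
          · exact absurd htc (by simp [tailC, hnd, hs'])
        · intro h
          rw [bad3, if_neg (by simp [hs']), if_pos hpos]
          refine (ih ifm).2.1 ?_
          rcases h with ht | ht3
          · exact down ht
          · exact absurd ht3 (by simp [tail3, hs', hnd])
      · have down : TrigP ifm (l :: r) → TrigP ifm r := by
          intro ht
          rcases trigP_down l r ifm ht with ⟨hcl, hifm, -⟩ | ht'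
          · exact absurd (by simp [hifm, hcl] : (ifm && isCatL l) = true) hc
          · simpa [hs'] using ht'
        by_cases hd : isDashL l = true
        · have hpe : isEntryL l = true := by simp [isEntryL_eq, hd, hs']
          refine ⟨?_, ?_, ?_⟩
          · intro h
            rw [bad1, if_neg (by simp [hs']), if_neg (by simpa using hc)]
            exact (ih ifm).1 (down h)
          · intro h
            rw [bad2, if_neg (by simp [hs']), if_neg (by simpa using hc), if_pos hd]
            refine (ih ifm).2.1 ?_
            rcases h with ht | htc
            · exact Or.inl (down ht)
            · exact Or.inr (by simpa [tailC, hpe] using htc)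
          · intro _
            rw [bad3, if_neg (by simp [hs']), if_neg (by simpa using hc), if_pos hd]
        · have hne : isEntryL l = false := by
            simp [isEntryL_eq, (by simpa using hd : isDashL l = false)]
          refine ⟨?_, ?_, ?_⟩
          · intro h
            rw [bad1, if_neg (by simp [hs']), if_neg (by simpa using hc)]
            exact (ih ifm).1 (down h)
          · intro h
            rw [bad2, if_neg (by simp [hs']), if_neg (by simpa using hc),
              if_neg (by simpa using hd)]
            rcases h with ht | htc
            · exact (ih ifm).1 (down ht)
            · exact absurd htc (by simp [tailC, hne, hs'])
          · intro h
            rw [bad3, if_neg (by simp [hs']), if_neg (by simpa using hc),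
              if_neg (by simpa using hd)]
            rcases h with ht | ht3
            · exact (ih ifm).1 (down ht)
            · exact absurd ht3 (by simp [tail3, hs', hne])

-- strict-length version of key: once the automaton reports divergence, A's output is strictly shorter
theorem keyLt (rest : List String) : ∀ (ifm : Bool) (nl : List String),
    (bad1 ifm rest = true →
      ((rest.foldl stepA (ifm, nl, false)).2.1).length < nl.length + (bOuter ifm rest).length) ∧
    (bad2 ifm rest = true →
      ((rest.foldl stepA (ifm, nl, true)).2.1).length < nl.length + (bInner ifm rest).length) ∧
    (bad3 ifm rest = true →
      ((rest.foldl stepA (ifm, nl, true)).2.1).length < nl.length + (bOuter ifm rest).length) := by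
  induction rest with
  | nil => intro ifm nl; refine ⟨?_, ?_, ?_⟩ <;> intro h <;> simp [bad1, bad2, bad3] at h
  | cons l r ih =>
    intro ifm nl
    by_cases hs : isSepL l = true
    · have hs' : PySem.Str.strip l = "---" := by simpa [isSepL] using hs
      have hstep : ∀ sk, stepA (ifm, nl, sk) l = (!ifm, nl ++ [l], sk) := by
        intro sk; simp [stepA, hs']
      have hB : bOuter ifm (l :: r) = l :: bOuter (!ifm) r := by
        rw [bOuter]; simp [hs']
      have hBi : bInner ifm (l :: r) = bOuter ifm (l :: r) := by
        rw [bInner]; simp [hs']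
      refine ⟨?_, ?_, ?_⟩ <;> intro h
      · rw [bad1, if_pos hs] at h
        have := (ih (!ifm) (nl ++ [l])).1 h
        rw [List.foldl_cons, hstep, hB]
        simp at this ⊢; omega
      · rw [bad2, if_pos hs] at h
        have := (ih (!ifm) (nl ++ [l])).2.2 h
        rw [List.foldl_cons, hstep, hBi, hB]
        simp at this ⊢; omega
      · rw [bad3, if_pos hs] at h
        have := (ih (!ifm) (nl ++ [l])).2.2 h
        rw [List.foldl_cons, hstep, hB]
        simp at this ⊢; omega
    · have hs' : ¬ PySem.Str.strip l = "---" := by simpa [isSepL] using hs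
      by_cases hc : (ifm && isCatL l) = true
      · rw [Bool.and_eq_true] at hc
        have hc2 : PySem.Chars.startswith (PySem.Chars.strip l.toList)
            ['c','a','t','e','g','o','r','i','e','s',':'] = true := by
          simpa [isCatL] using hc.2
        have hnd2 : PySem.Chars.startswith (PySem.Chars.strip l.toList) ['-'] = false := by
          simpa [isDashL] using cat_not_dash l hc.2
        have hstep : ∀ sk, stepA (ifm, nl, sk) l = (ifm, nl, true) := by
          intro sk; simp [stepA, hs', hc.1, hc2]
        have hB : bOuter ifm (l :: r) = bInner ifm r := by
          rw [bOuter]; simp [hs', hc.1, hc2]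
        have hBi : bInner ifm (l :: r) = bOuter ifm (l :: r) := by
          rw [bInner]; simp [hs', hnd2]
        have hpos : (ifm && isCatL l) = true := by simp [hc.1, hc.2]
        refine ⟨?_, ?_, ?_⟩ <;> intro h
        · rw [bad1, if_neg (by simpa using hs), if_pos hpos] at h
          rw [List.foldl_cons, hstep, hB]
          exact (ih ifm nl).2.1 h
        · rw [bad2, if_neg (by simpa using hs), if_pos hpos] at h
          rw [List.foldl_cons, hstep, hBi, hB]
          exact (ih ifm nl).2.1 h
        · rw [bad3, if_neg (by simpa using hs), if_pos hpos] at h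
          rw [List.foldl_cons, hstep, hB]
          exact (ih ifm nl).2.1 h
      · have hcand : (ifm && PySem.Chars.startswith (PySem.Chars.strip l.toList)
            ['c','a','t','e','g','o','r','i','e','s',':']) = false := by
          simpa [isCatL] using (show (ifm && isCatL l) = false by simpa using hc)
        by_cases hd : isDashL l = true
        · have hd2 : PySem.Chars.startswith (PySem.Chars.strip l.toList) ['-'] = true := by
            simpa [isDashL] using hd
          have hB : bOuter ifm (l :: r) = l :: bOuter ifm r := by
            rw [bOuter]; simp [hs', hcand]
          have hBi : bInner ifm (l :: r) = bInner ifm r := by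
            rw [bInner]; simp [hs', hd2]
          refine ⟨?_, ?_, ?_⟩ <;> intro h
          · rw [bad1, if_neg (by simpa using hs), if_neg (by simpa using hc)] at h
            have hstep : stepA (ifm, nl, false) l = (ifm, nl ++ [l], false) := by
              simp [stepA, hs', hcand]
            have := (ih ifm (nl ++ [l])).1 h
            rw [List.foldl_cons, hstep, hB]
            simp at this ⊢; omega
          · rw [bad2, if_neg (by simpa using hs), if_neg (by simpa using hc), if_pos hd] at h
            have hstep : stepA (ifm, nl, true) l = (ifm, nl, true) := by
              simp [stepA, hs', hcand, hd2]
            rw [List.foldl_cons, hstep, hBi]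
            exact (ih ifm nl).2.1 h
          · -- the diverging step: A skips the line, B keeps it
            have hstep : stepA (ifm, nl, true) l = (ifm, nl, true) := by
              simp [stepA, hs', hcand, hd2]
            rw [List.foldl_cons, hstep, hB]
            cases h3 : bad3 ifm r with
            | true =>
              have := (ih ifm nl).2.2 h3
              simp at this ⊢; omega
            | false =>
              have := (key r ifm nl).2.2 h3
              rw [this]; simp
        · have hd2 : PySem.Chars.startswith (PySem.Chars.strip l.toList) ['-'] = false := by
            simpa [isDashL] using hd
          have hstep : ∀ sk, stepA (ifm, nl, sk) l = (ifm, nl ++ [l], false) := by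
            intro sk; simp [stepA, hs', hcand, hd2]
          have hB : bOuter ifm (l :: r) = l :: bOuter ifm r := by
            rw [bOuter]; simp [hs', hcand]
          have hBi : bInner ifm (l :: r) = bOuter ifm (l :: r) := by
            rw [bInner]; simp [hs', hd2]
          refine ⟨?_, ?_, ?_⟩ <;> intro h
          · rw [bad1, if_neg (by simpa using hs), if_neg (by simpa using hc)] at h
            have := (ih ifm (nl ++ [l])).1 h
            rw [List.foldl_cons, hstep, hB]
            simp at this ⊢; omega
          · rw [bad2, if_neg (by simpa using hs), if_neg (by simpa using hc),
              if_neg (by simpa using hd)] at h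
            have := (ih ifm (nl ++ [l])).1 h
            rw [List.foldl_cons, hstep, hBi, hB]
            simp at this ⊢; omega
          · rw [bad3, if_neg (by simpa using hs), if_neg (by simpa using hc),
              if_neg (by simpa using hd)] at h
            have := (ih ifm (nl ++ [l])).1 h
            rw [List.foldl_cons, hstep, hB]
            simp at this ⊢; omega

theorem D_to_trigP (lines : List String) (h : D_remove_existing_categories lines) :
    TrigP false lines := by
  obtain ⟨t, hmem, hhead, hodd, htail⟩ := h
  obtain ⟨p, rfl⟩ : ∃ p, p ++ t = lines := (List.mem_tails _ _).1 hmem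
  obtain ⟨c, t', rfl⟩ : ∃ c t', t = c :: t' := by
    cases t with
    | nil => simp at hhead
    | cons c t' => exact ⟨c, t', rfl⟩
  refine ⟨p.length, by simp, ?_, ?_, ?_⟩
  · rw [List.getD_append_right p _ _ _ (le_refl p.length)]
    simpa using hhead
  · have hsplit : (p ++ c :: t').countP isSepL
        = p.countP isSepL + (c :: t').countP isSepL := by
      simp [List.countP_append]
    obtain ⟨m, hm⟩ := hodd
    rw [hsplit] at hm
    have hp : (p.countP isSepL) % 2 = 1 := by omega
    simpa [List.take_left] using hp
  · have hdrop : (p ++ c :: t').drop (p.length + 1) = t' := by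
      rw [List.drop_length_add_append 1]
      simp
    simpa [tailC, hdrop] using htail

-- ===== VERDICT (by name: the statements are the Claim_ definitions above) =====
theorem remove_existing_categories_spec : Claim_unchanged_remove_existing_categories := by
  intro lines _ hnD
  have hb : bad1 false lines = false := by
    cases h : bad1 false lines
    · rfl
    · exact absurd (trigP_D lines ((bads_to_pat lines false).1 h)) hnD
  have := (key lines false []).1 hb
  simpa [remove_existing_categories, remove_existing_categories_alt] using this

theorem remove_existing_categories_changed : Claim_changed_remove_existing_categories := by
  unfold Claim_changed_remove_existing_categories
  refine ⟨by decide, by decide, by decide, ?_, by decide⟩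
  simp only [remove_existing_categories_alt, pvDiffWitness_remove_existing_categories,
    pvDiffWitnessOut_remove_existing_categories, bOuter, bInner]
  decide

theorem remove_existing_categories_tight : Claim_exact_remove_existing_categories := by
  intro lines _ hD
  have hb : bad1 false lines = true := (pat_to_bads lines false).1 (D_to_trigP lines hD)
  have hlt := (keyLt lines false []).1 hb
  intro heq
  rw [show remove_existing_categories lines
      = (lines.foldl stepA (false, [], false)).2.1 from rfl] at heq
  rw [heq] at hlt
  simp [remove_existing_categories_alt] at hlt
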